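-- pv_equiv track=rewrite | github.com/G-Shamkhal/PythonEducation | mod4/task1.py | check
-- ===== SOURCE A (Python) =====
-- def check(s):
--     nums = list(map(int, s.split()))
--     if all(x == nums[0] for x in nums):
--         return "Все числа равны"
--     elif len(nums) == len(set(nums)):
--         return "Все числа разные"
--     else:
--         return "Есть равные и неравные числа"
-- ===== SOURCE B (Python) =====
-- def check(s):
--     nums = sorted(int(t) for t in s.split())
--     eq = sum(1 for a, b in zip(nums, nums[1:]) if a == b)
--     if eq == max(len(nums) - 1, 0):
--         return "Все числа равны"
--     if eq == 0:
--         return "Все числа разные"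
--     return "Есть равные и неравные числа"
-- ===== Notes on version B (the rewrite author's own statement) =====
-- stated objective: alternative
-- what changed: B sorts the parsed numbers and counts equal adjacent pairs in the sorted list, classifying by that single count (n-1 equal pairs = all equal, 0 = all distinct, otherwise mixed), replacing A's all()-equality pass plus set-cardinality comparison.
import Mathlib
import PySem

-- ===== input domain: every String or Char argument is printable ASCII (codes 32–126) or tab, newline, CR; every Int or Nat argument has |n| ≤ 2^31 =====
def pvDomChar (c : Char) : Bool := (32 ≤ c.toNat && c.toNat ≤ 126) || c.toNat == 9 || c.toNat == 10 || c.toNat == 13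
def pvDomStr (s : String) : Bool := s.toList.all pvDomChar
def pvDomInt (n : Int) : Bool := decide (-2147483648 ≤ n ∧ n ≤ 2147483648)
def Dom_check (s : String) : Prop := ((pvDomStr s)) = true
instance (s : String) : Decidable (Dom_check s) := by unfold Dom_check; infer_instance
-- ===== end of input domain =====

-- B sorts the parsed numbers and classifies by the count of equal adjacent pairs, instead of A's all()-pass plus set-cardinality check; equal return values on Pre_.

-- ===== PORT A =====
def check (s : String) : String :=
  let nums : List Int := (PySem.Str.split₀ s).map (fun t => (PySem.Int.ofStr? t).getD 0)
  if nums.all (fun x => x == (PySem.List.pyGet? nums 0).getD 0) then "Все числа равны"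
  else if nums.length == (PySem.Set.ofList nums).length then "Все числа разные"
  else "Есть равные и неравные числа"

-- ===== PORT B =====
def check_alt (s : String) : String :=
  let nums : List Int :=
    PySem.List.sorted ((PySem.Str.split₀ s).map (fun t => (PySem.Int.ofStr? t).getD 0)) (fun x => x) false
  let eqc : Int :=
    ((nums.zip (PySem.List.slice nums (some 1) none)).map
      (fun q => if q.1 == q.2 then (1 : Int) else 0)).sum
  if eqc == max ((nums.length : Int) - 1) 0 then "Все числа равны"
  else if eqc == 0 then "Все числа разные"
  else "Есть равные и неравные числа"

-- ===== PRECONDITION & SPEC =====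
-- Pre_ excludes exactly the strings with a whitespace-separated token that int() rejects, where A raises ValueError.
def Pre_check (s : String) : Prop :=
  ∀ t ∈ PySem.Str.split₀ s, (PySem.Int.ofStr? t).isSome
instance (s : String) : Decidable (Pre_check s) := by unfold Pre_check; infer_instance
def pvWitness_check : String := "1 2 1"
def Spec_check (s : String) (out : String) : Prop := out = check_alt s
instance (s : String) (out : String) : Decidable (Spec_check s out) := by unfold Spec_check; infer_instance

-- ===== CLAIM (what is proved, stated in full; the proofs are below) =====
def Claim_equal_check : Prop := ∀ (s : String), Dom_check s → Pre_check s → Spec_check s (check s)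

-- ===== LEMMAS AND PROOFS =====

-- adjacent-pair quantification over zip-with-tail is IsChain
lemma forall_zip_tail_iff_chain {α : Type} (p : α → α → Prop) (l : List α) :
    (∀ q ∈ l.zip l.tail, p q.1 q.2) ↔ List.IsChain p l := by
  induction l with
  | nil => simp
  | cons a m ih =>
    cases m with
    | nil => simp
    | cons b t =>
      rw [List.isChain_cons_cons, ← ih]
      simp only [List.tail_cons, List.zip_cons_cons, List.mem_cons]
      constructor
      · intro h
        exact ⟨h (a, b) (Or.inl rfl), fun q hq => h q (Or.inr hq)⟩
      · rintro ⟨h1, h2⟩ q hq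
        rcases hq with rfl | hq
        · exact h1
        · exact h2 q hq

-- conjunction of two IsChains
lemma chain_and {α : Type} {R S : α → α → Prop} {l : List α}
    (hR : List.IsChain R l) (hS : List.IsChain S l) :
    List.IsChain (fun a b => R a b ∧ S a b) l := by
  induction l with
  | nil => exact List.isChain_nil
  | cons a m ih =>
    cases m with
    | nil => exact List.isChain_singleton a
    | cons b t =>
      rw [List.isChain_cons_cons] at hR hS ⊢
      exact ⟨⟨hR.1, hS.1⟩, ih hR.2 hS.2⟩

-- the zip-with-tail has the tail's length
lemma length_zip_tail {α : Type} (l : List α) :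
    (l.zip l.tail).length = l.tail.length := by
  cases l with
  | nil => simp
  | cons a m => simp [List.length_zip]

-- the distinct set has full length iff the list has no duplicates
lemma ofList_length_eq_iff (xs : List Int) :
    (PySem.Set.ofList xs).length = xs.length ↔ xs.Nodup := by
  constructor
  · intro h
    have hperm : (PySem.Set.ofList xs).Perm xs.dedup := by
      rw [List.perm_ext_iff_of_nodup (PySem.Set.nodup_ofList _) (List.nodup_dedup _)]
      intro x
      rw [PySem.Set.mem_ofList, List.mem_dedup]
    have hlen : xs.dedup.length = xs.length := by
      rw [← hperm.length_eq, h]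
    have := (List.dedup_sublist xs).eq_of_length hlen
    rw [← List.dedup_eq_self]; exact this
  · intro h
    rw [PySem.Set.ofList_eq_self_of_nodup xs h]

-- the zip count in B, as a countP
lemma eqc_as_countP (l : List Int) :
    ((l.zip (PySem.List.slice l (some 1) none)).map
      (fun q => if q.1 == q.2 then (1 : Int) else 0)).sum
      = ((l.zip l.tail).countP (fun q => q.1 == q.2) : Int) := by
  rw [PySem.List.slice_from_one, PySem.List.sum_map_ite_one_zero]

-- all elements equal the head iff the count of equal adjacent pairs in any permutation is full
lemma count_eq_full_iff (l : List Int) (h : Int) (t : List Int)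
    (hperm : l.Perm (h :: t)) :
    ((l.zip l.tail).countP (fun q => q.1 == q.2) = l.tail.length)
      ↔ ∀ x ∈ (h :: t), x = h := by
  rw [← length_zip_tail, List.countP_eq_length]
  have hz : (∀ q ∈ l.zip l.tail, (fun (q : Int × Int) => q.1 == q.2) q = true)
      ↔ List.IsChain (fun a b : Int => a = b) l := by
    rw [← forall_zip_tail_iff_chain (fun a b : Int => a = b) l]
    simp
  rw [hz, List.isChain_iff_pairwise]
  constructor
  · intro hp x hx
    have hhl : h ∈ l := hperm.mem_iff.2 (by simp)
    have hxl : x ∈ l := hperm.mem_iff.2 hx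
    rcases l with _ | ⟨a, m⟩
    · cases hhl
    · have ha : ∀ y ∈ m, a = y := (List.pairwise_cons.1 hp).1
      have hxa : x = a := by
        rcases List.mem_cons.1 hxl with rfl | hx' ; · rfl
        · exact (ha x hx').symm
      have hha : h = a := by
        rcases List.mem_cons.1 hhl with rfl | hh' ; · rfl
        · exact (ha h hh').symm
      rw [hxa, hha]
  · intro hall
    have hl : ∀ x ∈ l, x = h := fun x hx => hall x (hperm.mem_iff.1 hx)
    exact List.Pairwise.imp_of_mem (by
      intro a b ha hb _
      rw [hl a ha, hl b hb]) (List.pairwise_of_forall_mem_list (fun a _ b _ => trivial))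

-- zero equal adjacent pairs in the sorted list iff no duplicates
lemma count_eq_zero_iff (xs : List Int) :
    (((PySem.List.sorted xs (fun x => x) false).zip
        (PySem.List.sorted xs (fun x => x) false).tail).countP (fun q => q.1 == q.2) = 0)
      ↔ xs.Nodup := by
  set l := PySem.List.sorted xs (fun x => x) false with hl
  have hperm : l.Perm xs := PySem.List.sorted_perm xs (fun x => x) false
  have hsorted : l.Pairwise (fun a b : Int => a ≤ b) := by
    have := PySem.List.sorted_pairwise xs (fun x => x)
    simpa [hl] using this
  rw [List.countP_eq_zero]
  have hz : (∀ q ∈ l.zip l.tail, ¬((fun (q : Int × Int) => q.1 == q.2) q = true))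
      ↔ List.IsChain (fun a b : Int => a ≠ b) l := by
    rw [← forall_zip_tail_iff_chain (fun a b : Int => a ≠ b) l]
    simp
  rw [hz]
  constructor
  · intro hc
    have hlt : List.IsChain (fun a b : Int => a < b) l := by
      have := chain_and (List.Pairwise.isChain hsorted) hc
      refine this.imp ?_
      intro a b hab
      exact lt_of_le_of_ne hab.1 hab.2
    have : l.Pairwise (fun a b : Int => a < b) := List.isChain_iff_pairwise.1 hlt
    exact hperm.nodup_iff.1 (this.imp ne_of_lt)
  · intro hn
    have : l.Nodup := hperm.nodup_iff.2 hn
    exact List.Pairwise.isChain this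

-- the branch structures of the two ports agree on any parsed list
lemma core (nums : List Int) :
    (if nums.all (fun x => x == (PySem.List.pyGet? nums 0).getD 0) then "Все числа равны"
     else if nums.length == (PySem.Set.ofList nums).length then "Все числа разные"
     else "Есть равные и неравные числа")
    = (let l := PySem.List.sorted nums (fun x => x) false
       let eqc : Int := ((l.zip (PySem.List.slice l (some 1) none)).map
          (fun q => if q.1 == q.2 then (1 : Int) else 0)).sum
       if eqc == max ((l.length : Int) - 1) 0 then "Все числа равны"
       else if eqc == 0 then "Все числа разные"
       else "Есть равные и неравные числа") := by
  set l := PySem.List.sorted nums (fun x => x) false with hl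
  have hperm : l.Perm nums := PySem.List.sorted_perm nums (fun x => x) false
  have hlen : l.length = nums.length := hperm.length_eq
  simp only [eqc_as_countP]
  cases hnums : nums with
  | nil =>
    have : l = [] := by rw [hl, hnums, PySem.List.sorted_eq_nil_iff]
    simp [this]
  | cons h t =>
    have hperm' : l.Perm (h :: t) := by rw [← hnums]; exact hperm
    have hA : (nums.all (fun x => x == (PySem.List.pyGet? nums 0).getD 0) = true)
        ↔ ∀ x ∈ (h :: t), x = h := by
      rw [hnums]
      simp [PySem.List.pyGet?, PySem.List.pyIdx?]
    have hltail : l.tail.length = t.length := by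
      have h1 : l.length = t.length + 1 := by rw [hlen, hnums]; simp
      rw [List.length_tail, h1]; omega
    have hcount_le : (l.zip l.tail).countP (fun q => q.1 == q.2) ≤ t.length := by
      calc (l.zip l.tail).countP (fun q => q.1 == q.2) ≤ (l.zip l.tail).length :=
            List.countP_le_length
        _ = l.tail.length := length_zip_tail l
        _ = t.length := hltail
    have hmax : max ((l.length : Int) - 1) 0 = (t.length : Int) := by
      have : l.length = t.length + 1 := by rw [hlen, hnums]; simp
      rw [this]; push_cast; omega
    have hfull : ((l.zip l.tail).countP (fun q => q.1 == q.2) : Int) = max ((l.length : Int) - 1) 0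
        ↔ ∀ x ∈ (h :: t), x = h := by
      rw [hmax, ← count_eq_full_iff l h t hperm']
      rw [hltail]
      constructor
      · intro hc; exact_mod_cast hc
      · intro hc; exact_mod_cast hc
    have hzero : ((l.zip l.tail).countP (fun q => q.1 == q.2) : Int) = 0 ↔ nums.Nodup := by
      rw [← hnums] at *
      rw [show ((l.zip l.tail).countP (fun q => q.1 == q.2) : Int) = 0
            ↔ (l.zip l.tail).countP (fun q => q.1 == q.2) = 0 by exact_mod_cast Iff.rfl]
      rw [hl, count_eq_zero_iff]
    by_cases hA1 : ∀ x ∈ (h :: t), x = h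
    · rw [hnums] at hA
      rw [if_pos (hA.2 hA1), if_pos (by simpa using hfull.2 hA1)]
    · have hB1 : ¬ (((l.zip l.tail).countP (fun q => q.1 == q.2) : Int) = max ((l.length : Int) - 1) 0) :=
        fun hc => hA1 (hfull.1 hc)
      rw [hnums] at hA
      rw [if_neg (by simpa using fun hc => hA1 (hA.1 hc))]
      by_cases hnd : (h :: t).Nodup
      · have hset : (h :: t).length = (PySem.Set.ofList (h :: t)).length :=
          ((ofList_length_eq_iff (h :: t)).2 hnd).symm
        rw [if_pos (by simpa using hset), if_neg (by simpa using hB1), if_pos (by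
          simp only [hnums] at hzero
          simpa using hzero.2 hnd)]
      · have hset : ¬ ((h :: t).length = (PySem.Set.ofList (h :: t)).length) := by
          intro hc
          exact hnd ((ofList_length_eq_iff (h :: t)).1 hc.symm)
        rw [if_neg (by simpa using hset), if_neg (by simpa using hB1), if_neg (by
          simp only [hnums] at hzero
          simpa using fun hc => hnd (hzero.1 hc))]

-- ===== VERDICT (by name: the statement is the Claim_ definition above) =====
theorem check_spec : Claim_equal_check := by
  intro s _ _
  show check s = check_alt s
  dsimp only [check, check_alt]
  exact core _
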